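-- pv_equiv track=rewrite | github.com/anurag-desp/Mini-Bool_render | dont_care.py | minimumPossibleVariables
-- ===== SOURCE A (Python) =====
-- def minimumPossibleVariables(lst):
--     if lst == []:
--         return 0
--     mx = max(lst)
--     n = 2
--     vars = 1
--     while(mx >= n):
--         n *= 2
--         vars += 1
--     return vars # minimum number of variables required
-- ===== SOURCE B (Python) =====
-- def minimumPossibleVariables(lst):
--     if lst == []:
--         return 0
--     mx = max(lst)
--     return 1 if mx < 2 else mx.bit_length()
-- ===== Notes on version B (the rewrite author's own statement) =====
-- stated objective: simpler
-- what changed: The doubling while-loop that counts how many times n=2 must double past max(lst) is replaced by the closed form mx.bit_length(), with a mx<2 branch returning 1 exactly as the non-iterating loop does for maxima 0, 1 and negatives.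
import Mathlib
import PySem

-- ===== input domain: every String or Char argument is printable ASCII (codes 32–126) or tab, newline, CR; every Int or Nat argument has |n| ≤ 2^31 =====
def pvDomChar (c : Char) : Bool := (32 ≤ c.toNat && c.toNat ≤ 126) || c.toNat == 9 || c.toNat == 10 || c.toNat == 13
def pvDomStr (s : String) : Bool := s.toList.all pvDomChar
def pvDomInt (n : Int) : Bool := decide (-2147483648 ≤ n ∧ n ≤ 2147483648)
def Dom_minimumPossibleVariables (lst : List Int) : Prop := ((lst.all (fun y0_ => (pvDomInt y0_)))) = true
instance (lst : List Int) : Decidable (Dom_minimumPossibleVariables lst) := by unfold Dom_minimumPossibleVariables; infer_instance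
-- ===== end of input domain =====

-- B replaces A's doubling while-loop by the closed form mx.bit_length() (with a mx<2 branch), for simplicity.


-- ===== PORT A =====
-- the while-loop; fuel only makes the recursion total (mx.natAbs + 1 iterations always suffice)
def pvLoopA (mx : Int) (n vars : Int) : Nat → Int
  | 0 => vars
  | fuel + 1 => if mx ≥ n then pvLoopA mx (n * 2) (vars + 1) fuel else vars

def minimumPossibleVariables (lst : List Int) : Int :=
  if lst = [] then 0
  else
    match PySem.List.max? lst (fun x => x) with
    | none => 0   -- unreachable: lst ≠ []
    | some mx => pvLoopA mx 2 1 (mx.natAbs + 1)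

-- ===== PORT B =====
-- mx.bit_length() ported as PySem.Int.bitLength (Python-exact)
def minimumPossibleVariables_alt (lst : List Int) : Int :=
  if lst = [] then 0
  else
    match PySem.List.max? lst (fun x => x) with
    | none => 0   -- unreachable: lst ≠ []
    | some mx => if mx < 2 then 1 else (PySem.Int.bitLength mx : Int)

-- ===== PRECONDITION & SPEC =====
def Spec_minimumPossibleVariables (lst : List Int) (out : Int) : Prop := out = minimumPossibleVariables_alt lst
instance (lst : List Int) (out : Int) : Decidable (Spec_minimumPossibleVariables lst out) := by unfold Spec_minimumPossibleVariables; infer_instance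

-- ===== CLAIM (what is proved, stated in full; the proofs are below) =====
def Claim_equal_minimumPossibleVariables : Prop := ∀ (lst : List Int), Dom_minimumPossibleVariables lst → Spec_minimumPossibleVariables lst (minimumPossibleVariables lst)

-- ===== LEMMAS AND PROOFS =====

-- a non-entered loop returns vars unchanged
theorem pvLoopA_lt (mx n vars : Int) (fuel : Nat) (h : mx < n) :
    pvLoopA mx n vars fuel = vars := by
  cases fuel with
  | zero => rfl
  | succ f => simp [pvLoopA, not_le.mpr h]

-- core invariant: starting at n = 2^k with 2^k ≤ mx and enough fuel, the loop
-- returns vars + (bitLength mx - k)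
theorem pvLoopA_eq (fuel : Nat) : ∀ (k : Nat) (vars mx : Int),
    mx.natAbs < 2 ^ (k + fuel) → (2 : Int) ^ k ≤ mx →
    pvLoopA mx (2 ^ k) vars fuel = vars + ((PySem.Int.bitLength mx : Int) - k) := by
  induction fuel with
  | zero =>
    intro k vars mx hlt hle
    exfalso
    have hpos : 0 < mx := lt_of_lt_of_le (by positivity) hle
    have h2 : (2 : Nat) ^ k ≤ mx.natAbs := by
      zify
      rw [abs_of_pos hpos]
      exact hle
    rw [Nat.add_zero] at hlt
    omega
  | succ f ih =>
    intro k vars mx hlt hle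
    have hstep : pvLoopA mx (2 ^ k) vars (f + 1)
        = pvLoopA mx (2 ^ k * 2) (vars + 1) f := by
      simp [pvLoopA, hle]
    have hpow : (2 : Int) ^ k * 2 = 2 ^ (k + 1) := by ring
    have hpos : 0 < mx := lt_of_lt_of_le (by positivity) hle
    by_cases hnext : (2 : Int) ^ (k + 1) ≤ mx
    · have := ih (k + 1) (vars + 1) mx (by
        have harith : k + 1 + f = k + (f + 1) := by omega
        rw [harith]; exact hlt) hnext
      rw [hstep, hpow, this]
      push_cast
      ring
    · push_neg at hnext
      rw [hstep, hpow, pvLoopA_lt mx _ _ f hnext]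
      -- here 2^k ≤ mx < 2^(k+1), so bitLength mx = k + 1
      have hbl : PySem.Int.bitLength mx = k + 1 := by
        have hub := PySem.Int.lt_two_pow_bitLength mx
        have hlb := PySem.Int.two_pow_bitLength_le mx (ne_of_gt hpos)
        have hge : (2 : Nat) ^ k ≤ mx.natAbs := by
          have h' := hle; rw [← Int.natAbs_of_nonneg hpos.le] at h'
          exact_mod_cast h'
        have hlt2 : mx.natAbs < (2 : Nat) ^ (k + 1) := by
          have h' := hnext; rw [← Int.natAbs_of_nonneg hpos.le] at h'
          exact_mod_cast h'
        set bl := PySem.Int.bitLength mx with hbl'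
        have h1 : k < bl := by
          have hp : (2:Nat) ^ k < 2 ^ bl := lt_of_le_of_lt hge hub
          exact (Nat.pow_lt_pow_iff_right (by norm_num)).mp hp
        have h2 : bl - 1 < k + 1 := by
          have hp : (2:Nat) ^ (bl - 1) < 2 ^ (k + 1) := lt_of_le_of_lt hlb hlt2
          exact (Nat.pow_lt_pow_iff_right (by norm_num)).mp hp
        omega
      rw [hbl]
      push_cast
      ring

-- ===== VERDICT (by name: the statement is the Claim_ definition above) =====
theorem minimumPossibleVariables_spec : Claim_equal_minimumPossibleVariables := by
  intro lst _
  unfold Spec_minimumPossibleVariables minimumPossibleVariables minimumPossibleVariables_alt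
  by_cases hnil : lst = []
  · simp [hnil]
  · simp only [if_neg hnil]
    cases hmx : PySem.List.max? lst (fun x => x) with
    | none => rfl
    | some mx =>
      by_cases h2 : mx < 2
      · simp [pvLoopA_lt mx 2 1 _ h2, h2]
      · push_neg at h2
        have hfuel : mx.natAbs < 2 ^ (1 + (mx.natAbs + 1)) := by
          calc mx.natAbs < 2 ^ mx.natAbs := Nat.lt_two_pow_self
            _ ≤ 2 ^ (1 + (mx.natAbs + 1)) := Nat.pow_le_pow_right (by norm_num) (by omega)
        have hmain := pvLoopA_eq (mx.natAbs + 1) 1 1 mx hfuel (by simpa using h2)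
        simp only [pow_one] at hmain
        simp [hmain, not_lt.mpr h2]
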